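-- pv_equiv track=rewrite | github.com/SEG-UNIBE/IntelliSorts | intellisorts_presortedness_metrics.py | inversions_comp
-- ===== SOURCE A (Python) =====
-- def inversions_comp(arr):
--     """
--     Number of comparisons needed for inversions computation.
--     """
--     count = 0
--     comparisons = 0
--     for key in range(len(arr)):
--         for j in range(key):
--             comparisons += 1
--             if arr[key] < arr[j]:
--                 count += 1
--
--     return comparisons
-- ===== SOURCE B (Python) =====
-- def inversions_comp(arr):
--     """
--     Number of comparisons needed for inversions computation.
--     """
--     n = len(arr)
--     return n * (n - 1) // 2
-- ===== Notes on version B (the rewrite author's own statement) =====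
-- stated objective: faster
-- what changed: Replaced the quadratic double loop counting one comparison per inner iteration with the closed-form formula n*(n-1)//2.
import Mathlib
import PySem

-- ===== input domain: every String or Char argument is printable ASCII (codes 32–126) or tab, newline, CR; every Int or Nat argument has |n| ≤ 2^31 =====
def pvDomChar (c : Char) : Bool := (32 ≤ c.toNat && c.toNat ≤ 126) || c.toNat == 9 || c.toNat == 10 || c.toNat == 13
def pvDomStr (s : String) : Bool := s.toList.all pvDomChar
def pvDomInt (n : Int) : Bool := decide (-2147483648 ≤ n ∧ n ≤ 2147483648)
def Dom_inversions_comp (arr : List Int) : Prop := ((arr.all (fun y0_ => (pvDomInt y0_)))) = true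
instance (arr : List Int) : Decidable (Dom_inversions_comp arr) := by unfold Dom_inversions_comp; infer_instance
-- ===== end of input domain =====

-- B replaces A's quadratic double loop (counting one comparison per inner step) by the closed form n*(n-1)//2.

-- ===== PORT A =====
def inversions_comp (arr : List Int) : Int :=
  let st := (PySem.List.pyRange 0 arr.length 1).foldl (fun (s : Int × Int) key =>
    (PySem.List.pyRange 0 key 1).foldl (fun (t : Int × Int) j =>
      let t' := (t.1, t.2 + 1)
      if PySem.List.pyGetD arr key 0 < PySem.List.pyGetD arr j 0 then (t'.1 + 1, t'.2) else t')
      s) ((0 : Int), (0 : Int))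
  st.2

-- ===== PORT B =====
def inversions_comp_alt (arr : List Int) : Int :=
  let n : Int := arr.length
  PySem.Int.floordiv (n * (n - 1)) 2

-- ===== PRECONDITION & SPEC =====
def Spec_inversions_comp (arr : List Int) (out : Int) : Prop := out = inversions_comp_alt arr
instance (arr : List Int) (out : Int) : Decidable (Spec_inversions_comp arr out) := by unfold Spec_inversions_comp; infer_instance

-- ===== CLAIM (what is proved, stated in full; the proofs are below) =====
def Claim_equal_inversions_comp : Prop := ∀ (arr : List Int), Dom_inversions_comp arr → Spec_inversions_comp arr (inversions_comp arr)

-- ===== LEMMAS AND PROOFS =====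

-- any fold whose step adds 1 to the second component adds the list length to it
theorem pv_foldl_snd_add (g : Int × Int → Int → Int × Int)
    (hg : ∀ t j, (g t j).2 = t.2 + 1) :
    ∀ (l : List Int) (s : Int × Int), (l.foldl g s).2 = s.2 + l.length := by
  intro l
  induction l with
  | nil => intro s; simp
  | cons x xs ih =>
    intro s
    simp [List.foldl_cons, ih, hg]
    omega

-- the second component of A's outer fold over range(n) is n*(n-1)/2
theorem pv_outer (arr : List Int) :
    ∀ (n : ℕ) (s : Int × Int),
      ((PySem.List.pyRange 0 n 1).foldl (fun (s : Int × Int) key =>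
        (PySem.List.pyRange 0 key 1).foldl (fun (t : Int × Int) j =>
          let t' := (t.1, t.2 + 1)
          if PySem.List.pyGetD arr key 0 < PySem.List.pyGetD arr j 0 then (t'.1 + 1, t'.2) else t')
          s) s).2 = s.2 + (n * (n - 1)) / 2 := by
  intro n
  induction n with
  | zero => intro s; simp
  | succ m ih =>
    intro s
    rw [show ((m + 1 : ℕ) : Int) = (m : Int) + 1 by push_cast; ring,
        PySem.List.pyRange_one_succ_right (by positivity), List.foldl_append]
    simp only [List.foldl_cons, List.foldl_nil]
    rw [pv_foldl_snd_add _ (by intro t j; split <;> rfl),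
        ih s, PySem.List.length_pyRange_one]
    have h1 : ((m : Int) - 0).toNat = m := by omega
    have h2 : ((m : Int) + 1) * (((m : Int) + 1) - 1) = (m : Int) * ((m : Int) - 1) + (m : Int) * 2 := by ring
    rw [h1, h2, Int.add_mul_ediv_right _ _ (by norm_num : (2:Int) ≠ 0)]
    ring

theorem pv_floordiv_two (k : Int) : PySem.Int.floordiv k 2 = k / 2 := by
  simp [PySem.Int.floordiv]
  rw [Int.fdiv_eq_ediv]
  simp

-- ===== VERDICT (by name: the statement is the Claim_ definition above) =====
theorem inversions_comp_spec : Claim_equal_inversions_comp := by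
  intro arr _
  unfold Spec_inversions_comp inversions_comp inversions_comp_alt
  rw [pv_outer arr arr.length ((0 : Int), (0 : Int))]
  rw [pv_floordiv_two]
  ring
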